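-- pv_equiv track=rewrite | github.com/Ethan-Otto/Tablewrite | ui/backend/app/tools/actor_query.py | normalize_uuid
-- ===== SOURCE A (Python) =====
-- def normalize_uuid(uuid_str: str) -> str:
--     """
--     Normalize a Foundry UUID to remove duplicate type prefixes.
--
--     Foundry sometimes returns UUIDs like 'Actor.Actor.xxx' instead of 'Actor.xxx'.
--     """
--     prefixes = ['Actor', 'JournalEntry', 'Scene', 'Item', 'Compendium']
--
--     for prefix in prefixes:
--         doubled = f"{prefix}.{prefix}."
--         single = f"{prefix}."
--         if uuid_str.startswith(doubled):
--             uuid_str = uuid_str.replace(doubled, single, 1)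
--
--     return uuid_str
-- ===== SOURCE B (Python) =====
-- def normalize_uuid(uuid_str: str) -> str:
--     """
--     Normalize a Foundry UUID to remove duplicate type prefixes.
--
--     Foundry sometimes returns UUIDs like 'Actor.Actor.xxx' instead of 'Actor.xxx'.
--     """
--     parts = uuid_str.split('.')
--     if len(parts) >= 3 and parts[0] == parts[1] and parts[0] in {'Actor', 'JournalEntry', 'Scene', 'Item', 'Compendium'}:
--         return '.'.join([parts[0]] + parts[2:])
--     return uuid_str
-- ===== Notes on version B (the rewrite author's own statement) =====
-- stated objective: simpler
-- what changed: B tokenizes the UUID once on the dot separator and drops one duplicated head segment by inspecting the first two tokens, instead of scanning the prefix list with startswith/replace per prefix.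
import Mathlib
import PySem

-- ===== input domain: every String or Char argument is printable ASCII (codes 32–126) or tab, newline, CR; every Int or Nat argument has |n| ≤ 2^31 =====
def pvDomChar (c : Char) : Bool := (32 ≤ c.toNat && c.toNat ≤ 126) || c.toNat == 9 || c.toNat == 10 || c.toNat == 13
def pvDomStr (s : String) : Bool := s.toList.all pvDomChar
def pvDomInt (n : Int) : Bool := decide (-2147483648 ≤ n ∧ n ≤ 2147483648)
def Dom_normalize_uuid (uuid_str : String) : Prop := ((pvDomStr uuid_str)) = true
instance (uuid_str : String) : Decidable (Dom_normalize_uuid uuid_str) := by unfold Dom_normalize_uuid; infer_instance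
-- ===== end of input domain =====

-- B replaces A's per-prefix startswith/replace scan by one split('.')-tokenization that drops a duplicated head segment (objective: simpler).

-- ===== PORT A =====
-- hand port of Python's s.replace(old, new, 1): exact — replaces the FIRST occurrence of old (found by str.find) if any
def pyReplace1 (s old new : List Char) : List Char :=
  let i := PySem.Chars.find s old
  if i = -1 then s else s.take i.toNat ++ new ++ s.drop (i.toNat + old.length)

-- one iteration of A's `for prefix in prefixes` loop body
def nuStep (s p : List Char) : List Char :=
  let doubled := p ++ ['.'] ++ p ++ ['.']
  let single := p ++ ['.']
  if PySem.Chars.startswith s doubled then pyReplace1 s doubled single else s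

def nuPrefixes : List (List Char) :=
  ["Actor".toList, "JournalEntry".toList, "Scene".toList, "Item".toList, "Compendium".toList]

def normalize_uuid (uuid_str : String) : String :=
  String.ofList (nuPrefixes.foldl nuStep uuid_str.toList)

-- ===== PORT B =====
def nuAltList (l : List Char) : List Char :=
  let parts := PySem.Chars.splitOn l ['.']
  if 3 ≤ parts.length ∧ parts.getD 0 [] = parts.getD 1 [] ∧
      parts.getD 0 [] ∈ PySem.Set.ofList nuPrefixes then
    PySem.Chars.join ['.'] (parts.getD 0 [] :: parts.drop 2)
  else l

def normalize_uuid_alt (uuid_str : String) : String :=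
  String.ofList (nuAltList uuid_str.toList)

-- ===== PRECONDITION & SPEC =====
def Spec_normalize_uuid (uuid_str : String) (out : String) : Prop := out = normalize_uuid_alt uuid_str
instance (uuid_str : String) (out : String) : Decidable (Spec_normalize_uuid uuid_str out) := by unfold Spec_normalize_uuid; infer_instance

-- ===== CLAIM (what is proved, stated in full; the proofs are below) =====
def Claim_equal_normalize_uuid : Prop := ∀ (uuid_str : String), Dom_normalize_uuid uuid_str → Spec_normalize_uuid uuid_str (normalize_uuid uuid_str)

-- ===== LEMMAS AND PROOFS =====

-- step equations of the fuelled splitOn.go loop, specialised to sep = ['.']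
lemma go_zero (l cur : List Char) (acc : List (List Char)) :
    PySem.Chars.splitOn.go ['.'] 0 l cur acc = ((cur.reverse ++ l) :: acc).reverse := by
  rw [PySem.Chars.splitOn.go.eq_def]

lemma go_nil (fuel : Nat) (cur : List Char) (acc : List (List Char)) :
    PySem.Chars.splitOn.go ['.'] (fuel+1) [] cur acc = (cur.reverse :: acc).reverse := by
  rw [PySem.Chars.splitOn.go.eq_def]

lemma go_cons (fuel : Nat) (c : Char) (rest cur : List Char) (acc : List (List Char)) :
    PySem.Chars.splitOn.go ['.'] (fuel+1) (c :: rest) cur acc =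
      if c = '.' then PySem.Chars.splitOn.go ['.'] fuel rest [] (cur.reverse :: acc)
      else PySem.Chars.splitOn.go ['.'] fuel rest (c :: cur) acc := by
  rw [PySem.Chars.splitOn.go.eq_def]
  simp [List.isPrefixOf]
  by_cases h : c = '.'
  · simp [h]
  · simp [h, Ne.symm h]

-- the accumulator of splitOn.go only ever gets reversed onto the front of the result
lemma go_acc (fuel : Nat) : ∀ (l cur : List Char) (acc : List (List Char)),
    PySem.Chars.splitOn.go ['.'] fuel l cur acc =
      acc.reverse ++ PySem.Chars.splitOn.go ['.'] fuel l cur [] := by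
  induction fuel with
  | zero => intro l cur acc; rw [go_zero, go_zero]; simp
  | succ fuel ih =>
    intro l cur acc
    cases l with
    | nil => rw [go_nil, go_nil]; simp
    | cons c rest =>
      rw [go_cons, go_cons]
      by_cases h : c = '.'
      · simp only [h, if_true]
        rw [ih _ _ (cur.reverse :: acc), ih _ _ [cur.reverse]]
        simp
      · simp only [h, if_false]
        rw [ih rest (c :: cur) acc]

lemma go_ne_nil (fuel : Nat) : ∀ (l cur : List Char) (acc : List (List Char)),
    PySem.Chars.splitOn.go ['.'] fuel l cur acc ≠ [] := by
  induction fuel with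
  | zero => intro l cur acc; rw [go_zero]; simp
  | succ fuel ih =>
    intro l cur acc
    cases l with
    | nil => rw [go_nil]; simp
    | cons c rest =>
      rw [go_cons]
      by_cases h : c = '.'
      · simp only [h, if_true]; exact ih _ _ _
      · simp only [h, if_false]; exact ih _ _ _

lemma splitOn_ne_nil (l : List Char) : PySem.Chars.splitOn l ['.'] ≠ [] := by
  unfold PySem.Chars.splitOn; exact go_ne_nil _ _ _ _

-- consuming a dot-free token p followed by '.' closes one part
lemma go_skip (p : List Char) : ∀ (fuel : Nat) (t cur : List Char) (acc : List (List Char)),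
    ('.' : Char) ∉ p → p.length + 1 ≤ fuel →
    PySem.Chars.splitOn.go ['.'] fuel (p ++ '.' :: t) cur acc =
      PySem.Chars.splitOn.go ['.'] (fuel - (p.length + 1)) t [] ((cur.reverse ++ p) :: acc) := by
  induction p with
  | nil =>
    intro fuel t cur acc _ hf
    obtain ⟨fuel', rfl⟩ : ∃ f, fuel = f + 1 := ⟨fuel - 1, by omega⟩
    rw [List.nil_append, go_cons]
    simp
  | cons c p ih =>
    intro fuel t cur acc hp hf
    obtain ⟨fuel', rfl⟩ : ∃ f, fuel = f + 1 := ⟨fuel - 1, by omega⟩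
    have hc : c ≠ '.' := fun h => hp (by simp [h])
    rw [List.cons_append, go_cons]
    simp only [hc, if_false]
    rw [ih fuel' t (c :: cur) acc (fun h => hp (List.mem_cons_of_mem _ h)) (by simp at hf ⊢; omega)]
    have h1 : ((c :: cur).reverse ++ p) = (cur.reverse ++ c :: p) := by simp
    have h2 : fuel' - (p.length + 1) = fuel' + 1 - ((c :: p).length + 1) := by
      simp only [List.length_cons]; omega
    rw [h1, h2]

lemma splitOn_cons (p t : List Char) (hp : ('.' : Char) ∉ p) :
    PySem.Chars.splitOn (p ++ '.' :: t) ['.'] = p :: PySem.Chars.splitOn t ['.'] := by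
  unfold PySem.Chars.splitOn
  rw [go_skip p _ t [] [] hp (by simp)]
  have h2 : (p ++ '.' :: t).length + 1 - (p.length + 1) = t.length + 1 := by simp
  rw [h2, go_acc]
  simp

lemma go_join (fuel : Nat) : ∀ (l cur : List Char), l.length < fuel →
    PySem.Chars.join ['.'] (PySem.Chars.splitOn.go ['.'] fuel l cur []) = cur.reverse ++ l := by
  induction fuel with
  | zero => omega
  | succ fuel ih =>
    intro l cur hf
    cases l with
    | nil =>
      rw [go_nil]
      simp only [List.reverse_cons, List.reverse_nil, List.nil_append]
      rw [PySem.Chars.join_singleton]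
      simp
    | cons c rest =>
      rw [go_cons]
      by_cases h : c = '.'
      · simp only [h, if_true]
        rw [go_acc]
        obtain ⟨h1, t1, hsplit⟩ := List.exists_cons_of_ne_nil (go_ne_nil fuel rest [] [])
        rw [hsplit, show (([cur.reverse].reverse : List (List Char)) ++ h1 :: t1) = cur.reverse :: h1 :: t1 by simp,
          PySem.Chars.join_cons_cons]
        have := ih rest [] (by simpa using hf)
        rw [hsplit] at this
        simp only [List.reverse_nil, List.nil_append] at this
        simp [this]
      · simp only [h, if_false]
        rw [ih rest (c :: cur) (by simpa using hf)]
        simp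

lemma join_splitOn (l : List Char) :
    PySem.Chars.join ['.'] (PySem.Chars.splitOn l ['.']) = l := by
  unfold PySem.Chars.splitOn
  simpa using go_join (l.length + 1) l [] (by omega)

-- str.find of a prefix is 0
lemma find_of_prefix (s sub : List Char) (h : sub <+: s) : PySem.Chars.find s sub = 0 := by
  have hinf : sub <:+: s := h.isInfix
  have hnn : 0 ≤ PySem.Chars.find s sub := (PySem.Chars.find_nonneg_iff s sub).mpr hinf
  obtain ⟨_, hmin⟩ := PySem.Chars.find_spec hnn
  by_contra hne
  have h0 : 0 < (PySem.Chars.find s sub).toNat := by omega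
  exact hmin 0 h0 (by simpa using h)

-- the step for the doubled prefix fires and drops one copy
lemma nuStep_fire (p t : List Char) :
    nuStep (p ++ ['.'] ++ p ++ ['.'] ++ t) p = p ++ '.' :: t := by
  simp only [nuStep]
  have hpre : (p ++ ['.'] ++ p ++ ['.']) <+: (p ++ ['.'] ++ p ++ ['.'] ++ t) := ⟨t, rfl⟩
  split
  case isTrue =>
    simp only [pyReplace1]
    rw [find_of_prefix _ _ hpre]
    simp
  case isFalse hf =>
    exact absurd ((PySem.Chars.startswith_iff _ _).mpr hpre) hf

lemma nuStep_fire' (p t : List Char) :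
    nuStep (p ++ '.' :: (p ++ '.' :: t)) p = p ++ '.' :: t := by
  have h := nuStep_fire p t
  have e : p ++ ['.'] ++ p ++ ['.'] ++ t = p ++ '.' :: (p ++ '.' :: t) := by simp
  rwa [e] at h

-- a step for a prefix whose first char differs from s's first char does nothing
lemma nuStep_skip (c : Char) (u : List Char) (d : Char) (q : List Char)
    (h : d ≠ c) : nuStep (c :: u) (d :: q) = c :: u := by
  simp only [nuStep]
  split
  case isTrue hsw =>
    exfalso
    obtain ⟨r, hr⟩ := (PySem.Chars.startswith_iff _ _).mp hsw
    simp only [List.cons_append, List.append_assoc] at hr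
    exact h (by injection hr)
  case isFalse => rfl

lemma nuStep_skip' (a p u : List Char) (ha : a ≠ []) (hp : p ≠ [])
    (hh : a.head? ≠ p.head?) : nuStep (a ++ '.' :: u) p = a ++ '.' :: u := by
  cases a with
  | nil => exact absurd rfl ha
  | cons c a' =>
    cases p with
    | nil => exact absurd rfl hp
    | cons d q =>
      simp only [List.head?_cons, ne_eq, Option.some.injEq] at hh
      exact nuStep_skip c (a' ++ '.' :: u) d q (fun hdc => hh hdc.symm)

-- each listed prefix is dot-free
lemma prefixes_dot_free : ∀ q ∈ nuPrefixes, ('.' : Char) ∉ q := by decide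

-- the list-level equivalence
lemma nuList_eq (l : List Char) : nuPrefixes.foldl nuStep l = nuAltList l := by
  by_cases hB : 3 ≤ (PySem.Chars.splitOn l ['.']).length ∧
      (PySem.Chars.splitOn l ['.']).getD 0 [] = (PySem.Chars.splitOn l ['.']).getD 1 [] ∧
      (PySem.Chars.splitOn l ['.']).getD 0 [] ∈ PySem.Set.ofList nuPrefixes
  · -- B fires: parts = a :: a :: c :: rest3 with a a listed prefix
    obtain ⟨hlen, heq, hmem⟩ := hB
    obtain ⟨a, rest1, hsp⟩ := List.exists_cons_of_ne_nil (splitOn_ne_nil l)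
    obtain ⟨b, rest2, hsp2⟩ := List.exists_cons_of_ne_nil (show rest1 ≠ [] by
      intro h; rw [h] at hsp; rw [hsp] at hlen; simp at hlen)
    obtain ⟨c, rest3, hsp3⟩ := List.exists_cons_of_ne_nil (show rest2 ≠ [] by
      intro h; rw [h] at hsp2; rw [hsp2] at hsp; rw [hsp] at hlen; simp at hlen)
    subst hsp3; subst hsp2
    rw [hsp] at heq hmem
    simp only [List.getD_cons_zero, List.getD_cons_succ] at heq hmem
    subst heq
    have hmem' : a ∈ nuPrefixes := (PySem.Set.mem_ofList _ _).mp hmem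
    have hj := join_splitOn l
    rw [hsp, PySem.Chars.join_cons_cons, PySem.Chars.join_cons_cons] at hj
    have hl : l = a ++ '.' :: (a ++ '.' :: PySem.Chars.join ['.'] (c :: rest3)) := by
      rw [← hj]; simp
    unfold nuAltList
    rw [hsp, if_pos ⟨by simp, rfl, by simpa using hmem⟩]
    simp only [List.getD_cons_zero, List.drop_succ_cons, List.drop_zero]
    rw [PySem.Chars.join_cons_cons, hl]
    set u := PySem.Chars.join ['.'] (c :: rest3) with hu
    simp only [nuPrefixes, List.foldl_cons, List.foldl_nil]
    simp only [nuPrefixes, List.mem_cons, List.not_mem_nil, or_false] at hmem'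
    rcases hmem' with rfl | rfl | rfl | rfl | rfl
    · rw [nuStep_fire',
        nuStep_skip' _ "JournalEntry".toList _ (by decide) (by decide) (by decide),
        nuStep_skip' _ "Scene".toList _ (by decide) (by decide) (by decide),
        nuStep_skip' _ "Item".toList _ (by decide) (by decide) (by decide),
        nuStep_skip' _ "Compendium".toList _ (by decide) (by decide) (by decide)]
      simp
    · rw [nuStep_skip' _ "Actor".toList _ (by decide) (by decide) (by decide),
        nuStep_fire',
        nuStep_skip' _ "Scene".toList _ (by decide) (by decide) (by decide),
        nuStep_skip' _ "Item".toList _ (by decide) (by decide) (by decide),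
        nuStep_skip' _ "Compendium".toList _ (by decide) (by decide) (by decide)]
      simp
    · rw [nuStep_skip' _ "Actor".toList _ (by decide) (by decide) (by decide),
        nuStep_skip' _ "JournalEntry".toList _ (by decide) (by decide) (by decide),
        nuStep_fire',
        nuStep_skip' _ "Item".toList _ (by decide) (by decide) (by decide),
        nuStep_skip' _ "Compendium".toList _ (by decide) (by decide) (by decide)]
      simp
    · rw [nuStep_skip' _ "Actor".toList _ (by decide) (by decide) (by decide),
        nuStep_skip' _ "JournalEntry".toList _ (by decide) (by decide) (by decide),
        nuStep_skip' _ "Scene".toList _ (by decide) (by decide) (by decide),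
        nuStep_fire',
        nuStep_skip' _ "Compendium".toList _ (by decide) (by decide) (by decide)]
      simp
    · rw [nuStep_skip' _ "Actor".toList _ (by decide) (by decide) (by decide),
        nuStep_skip' _ "JournalEntry".toList _ (by decide) (by decide) (by decide),
        nuStep_skip' _ "Scene".toList _ (by decide) (by decide) (by decide),
        nuStep_skip' _ "Item".toList _ (by decide) (by decide) (by decide),
        nuStep_fire']
      simp
  · -- B does not fire, so no step of A fires either
    have hstep : ∀ p ∈ nuPrefixes, nuStep l p = l := by
      intro p hp
      simp only [nuStep]
      split
      case isTrue hsw =>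
        exfalso
        obtain ⟨t, ht⟩ := (PySem.Chars.startswith_iff _ _).mp hsw
        have hdot : ('.' : Char) ∉ p := prefixes_dot_free p hp
        have hl : l = p ++ '.' :: (p ++ '.' :: t) := by rw [← ht]; simp
        have hsplit : PySem.Chars.splitOn l ['.'] =
            p :: p :: PySem.Chars.splitOn t ['.'] := by
          rw [hl, splitOn_cons _ _ hdot, splitOn_cons _ _ hdot]
        apply hB
        rw [hsplit]
        obtain ⟨h1, t1, he⟩ := List.exists_cons_of_ne_nil (splitOn_ne_nil t)
        refine ⟨by rw [he]; simp, rfl, by simpa [PySem.Set.mem_ofList] using hp⟩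
      case isFalse => rfl
    unfold nuAltList
    rw [if_neg hB]
    simp only [nuPrefixes, List.foldl_cons, List.foldl_nil]
    rw [hstep "Actor".toList (by simp [nuPrefixes]),
      hstep "JournalEntry".toList (by simp [nuPrefixes]),
      hstep "Scene".toList (by simp [nuPrefixes]),
      hstep "Item".toList (by simp [nuPrefixes]),
      hstep "Compendium".toList (by simp [nuPrefixes])]

-- ===== VERDICT (by name: the statement is the Claim_ definition above) =====
theorem normalize_uuid_spec : Claim_equal_normalize_uuid := by
  intro s _
  unfold Spec_normalize_uuid normalize_uuid normalize_uuid_alt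
  rw [nuList_eq]
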